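-- pv_equiv track=rewrite | github.com/pypi-data/pypi-mirror-402 | packages/lamin_utils/lamin_utils-0.16.3.tar.gz/lamin_utils-0.16.3/lamin_utils/_base62.py | increment_base62
-- ===== SOURCE A (Python) =====
-- CHARSET_DEFAULT = "0123456789ABCDEFGHIJKLMNOPQRSTUVWXYZabcdefghijklmnopqrstuvwxyz"
--
-- def increment_base62(s: str) -> str:
--     # we don't need to throw an error for zzzz because uids are enforced to be unique
--     # on the db level and have an enforced maximum length
--     value = sum(CHARSET_DEFAULT.index(c) * (62**i) for i, c in enumerate(reversed(s)))
--     value += 1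
--     result = ""
--     while value:
--         value, remainder = divmod(value, 62)
--         result = CHARSET_DEFAULT[remainder] + result
--     return result.zfill(len(s))
-- ===== SOURCE B (Python) =====
-- CHARSET_DEFAULT = "0123456789ABCDEFGHIJKLMNOPQRSTUVWXYZabcdefghijklmnopqrstuvwxyz"
--
-- def increment_base62(s: str) -> str:
--     # Right-to-left carry: find the rightmost non-maximal digit,
--     # bump it, and zero everything after it. No bignum decode/re-encode.
--     i = len(s)
--     while i > 0 and s[i - 1] == "z":
--         i -= 1
--     if i == 0:
--         return "1" + "0" * len(s)
--     c = CHARSET_DEFAULT[CHARSET_DEFAULT.index(s[i - 1]) + 1]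
--     return s[: i - 1] + c + "0" * (len(s) - i)
-- ===== Notes on version B (the rewrite author's own statement) =====
-- stated objective: faster
-- what changed: B replaces A's full bignum decode (sum of index*62^i), +1, and divmod re-encode loop with a single right-to-left scan that bumps the rightmost non-maximal digit and zeroes the suffix.
import Mathlib
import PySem

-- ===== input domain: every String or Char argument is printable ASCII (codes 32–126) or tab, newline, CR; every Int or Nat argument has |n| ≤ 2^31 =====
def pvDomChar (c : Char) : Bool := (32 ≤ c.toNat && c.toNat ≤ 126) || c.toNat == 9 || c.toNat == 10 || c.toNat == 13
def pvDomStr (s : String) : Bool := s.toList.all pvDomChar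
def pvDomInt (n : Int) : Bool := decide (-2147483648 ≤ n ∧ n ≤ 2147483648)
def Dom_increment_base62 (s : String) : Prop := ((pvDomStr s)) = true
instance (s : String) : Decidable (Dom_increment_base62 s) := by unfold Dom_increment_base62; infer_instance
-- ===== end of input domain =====

-- B increments the base-62 string by a right-to-left carry scan (bump the rightmost
-- non-maximal digit, zero the suffix) instead of A's bignum decode / +1 / re-encode: asymptotically faster.


def pvCharset : String := "0123456789ABCDEFGHIJKLMNOPQRSTUVWXYZabcdefghijklmnopqrstuvwxyz"

-- ===== PORT A =====
-- CHARSET_DEFAULT.index(c): str.index = find; the ValueError case (find = -1) is excluded by Pre_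
def pvIdx (c : Char) : Int := PySem.Chars.find pvCharset.toList [c]

-- the 'while value:' loop of A; under Pre_ the decoded value is ≥ 0, so divmod(value, 62)
-- is exactly Nat division/modulus (PySem.Int.floordiv_natCast / mod_natCast) and the loop runs on Nat
def pvEncodeLoop (value : Nat) (result : List Char) : List Char :=
  if h : value = 0 then result
  else pvEncodeLoop (value / 62)
        (PySem.List.pyGetD pvCharset.toList ((value % 62 : Nat) : Int) ' ' :: result)
  termination_by value
  decreasing_by exact Nat.div_lt_self (Nat.pos_of_ne_zero h) (by norm_num)

def increment_base62 (s : String) : String :=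
  let value : Int :=
    (PySem.List.enumerate s.toList.reverse).foldl
      (fun a ic => a + pvIdx ic.2 * 62 ^ ic.1.toNat) 0  -- enumerate indices are ≥ 0, so 62**i is 62^i.toNat
  String.ofList (PySem.Chars.zfill (pvEncodeLoop (value + 1).toNat []) (s.toList.length : Int))

-- ===== PORT B =====
-- Source B's while loop scanning past trailing maximal digits; i ≤ len(s) throughout, so s[i-1] is an in-range index
def pvScan (cs : List Char) (i : Nat) : Nat :=
  if h : 0 < i ∧ cs.getD (i - 1) ' ' = 'z' then pvScan cs (i - 1) else i
  termination_by i
  decreasing_by omega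

def increment_base62_alt (s : String) : String :=
  let cs := s.toList
  let i := pvScan cs cs.length
  if i = 0 then String.ofList ('1' :: List.replicate cs.length '0')
  else
    let c := PySem.List.pyGetD pvCharset.toList
               (PySem.Chars.find pvCharset.toList [cs.getD (i - 1) ' '] + 1) ' '
    String.ofList (cs.take (i - 1) ++ c :: List.replicate (cs.length - i) '0')

-- ===== PRECONDITION & SPEC =====
-- Pre_ excludes exactly the strings containing a character outside the base-62 charset,
-- on which A's CHARSET_DEFAULT.index(c) raises ValueError.
def Pre_increment_base62 (s : String) : Prop := (s.toList.all (fun c => pvCharset.toList.contains c)) = true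
instance (s : String) : Decidable (Pre_increment_base62 s) := by unfold Pre_increment_base62; infer_instance
def pvWitness_increment_base62 : String := "a9z"

def Spec_increment_base62 (s : String) (out : String) : Prop := out = increment_base62_alt s
instance (s : String) (out : String) : Decidable (Spec_increment_base62 s out) := by unfold Spec_increment_base62; infer_instance

-- ===== CLAIM (what is proved, stated in full; the proofs are below) =====
def Claim_equal_increment_base62 : Prop := ∀ (s : String), Dom_increment_base62 s → Pre_increment_base62 s → Spec_increment_base62 s (increment_base62 s)

-- ===== LEMMAS AND PROOFS =====

lemma pvPre_mem (s : String) (h : Pre_increment_base62 s) : ∀ c ∈ s.toList, c ∈ pvCharset.toList := by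
  intro c hc
  have := List.all_eq_true.mp h c hc
  simpa using this

-- digit value of a charset character, as a Nat
def pvDval (c : Char) : Nat := (pvIdx c).toNat
-- character of a digit
def pvCharAt (k : Nat) : Char := pvCharset.toList.getD k ' '
-- the number denoted by a digit string (most significant digit first)
def pvVal (l : List Char) : Nat := l.foldl (fun a c => 62 * a + pvDval c) 0
-- A's encode loop with empty accumulator
def pvEnc (v : Nat) : List Char := pvEncodeLoop v []
-- left-pad with '0'
def pvZf (cs : List Char) (n : Nat) : List Char := List.replicate (n - cs.length) '0' ++ cs
-- list-level body of increment_base62_alt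
def pvAltL (cs : List Char) : List Char :=
  let i := pvScan cs cs.length
  if i = 0 then '1' :: List.replicate cs.length '0'
  else
    (cs.take (i - 1) ++ PySem.List.pyGetD pvCharset.toList
        (PySem.Chars.find pvCharset.toList [cs.getD (i - 1) ' '] + 1) ' '
      :: List.replicate (cs.length - i) '0')

set_option maxRecDepth 4000 in
lemma pvCharFactsB : (pvCharset.toList.all fun c =>
    decide (0 ≤ pvIdx c ∧ pvIdx c < 62 ∧ pvCharAt (pvDval c) = c)) = true := by decide

lemma pvCharFacts : ∀ c ∈ pvCharset.toList,
    0 ≤ pvIdx c ∧ pvIdx c < 62 ∧ pvCharAt (pvDval c) = c := by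
  simpa [List.all_eq_true] using pvCharFactsB

set_option maxRecDepth 4000 in
lemma pvCharFactsNonZB : (pvCharset.toList.all fun c =>
    decide (c = 'z' ∨ pvIdx c < 61)) = true := by decide

lemma pvCharFactsNonZ : ∀ c ∈ pvCharset.toList, c ≠ 'z' → pvIdx c < 61 := by
  have h := pvCharFactsNonZB
  simp only [List.all_eq_true, decide_eq_true_eq] at h
  intro c hc hz
  rcases h c hc with h' | h'
  · exact absurd h' hz
  · exact h'

set_option maxRecDepth 4000 in
lemma pvCharAt_mem : ∀ k : Nat, k < 62 → pvCharAt k ∈ pvCharset.toList := by decide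

lemma pvEncodeLoop_acc (v : Nat) : ∀ acc, pvEncodeLoop v acc = pvEnc v ++ acc := by
  induction v using Nat.strong_induction_on with
  | _ v ih =>
    intro acc
    by_cases h : v = 0
    · subst h; simp [pvEnc, pvEncodeLoop]
    · have hlt : v / 62 < v := Nat.div_lt_self (Nat.pos_of_ne_zero h) (by norm_num)
      rw [pvEnc]
      conv_lhs => rw [pvEncodeLoop]
      conv_rhs => rw [pvEncodeLoop]
      rw [dif_neg h, dif_neg h]
      rw [ih _ hlt, ih _ hlt]
      simp

lemma pvEnc_pos (v : Nat) (h : v ≠ 0) :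
    pvEnc v = pvEnc (v / 62) ++ [pvCharAt (v % 62)] := by
  conv_lhs => rw [pvEnc, pvEncodeLoop]
  rw [dif_neg h, pvEncodeLoop_acc, PySem.List.pyGetD_natCast]
  rfl

lemma pvEnc_mem (v : Nat) : ∀ c ∈ pvEnc v, c ∈ pvCharset.toList := by
  induction v using Nat.strong_induction_on with
  | _ v ih =>
    by_cases h : v = 0
    · subst h; simp [pvEnc, pvEncodeLoop]
    · rw [pvEnc_pos v h]
      intro c hc
      rcases List.mem_append.mp hc with hc | hc
      · exact ih _ (Nat.div_lt_self (Nat.pos_of_ne_zero h) (by norm_num)) c hc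
      · simp only [List.mem_singleton] at hc
        subst hc
        exact pvCharAt_mem _ (Nat.mod_lt _ (by norm_num))

lemma pvPlusMinusNotMem : '+' ∉ pvCharset.toList ∧ '-' ∉ pvCharset.toList := by decide

lemma pvZfill_eq (cs : List Char) (n : Nat)
    (h : ∀ c, cs.head? = some c → c ∈ pvCharset.toList) :
    PySem.Chars.zfill cs (n : Int) = pvZf cs n := by
  rw [PySem.Chars.zfill.eq_def, pvZf]
  split
  · rename_i hle
    have h0 : n - cs.length = 0 := by
      have : (n : Int) ≤ (cs.length : Int) := hle
      omega
    rw [h0]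
    simp
  · rename_i hgt
    have hn : ((n : Int)).toNat = n := Int.toNat_natCast n
    cases cs with
    | nil => simp
    | cons c rest =>
      have hc : c ∈ pvCharset.toList := h c rfl
      have hns : ¬ (c = '+' ∨ c = '-') := by
        rintro (rfl | rfl)
        · exact pvPlusMinusNotMem.1 hc
        · exact pvPlusMinusNotMem.2 hc
      simp [hns, hn]

lemma pvPeel (v n : Nat) :
    pvZf (pvEnc v) (n + 1) = pvZf (pvEnc (v / 62)) n ++ [pvCharAt (v % 62)] := by
  by_cases h : v = 0
  · subst h
    simp [pvEnc, pvEncodeLoop, pvZf, pvCharAt, List.replicate_succ']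
    decide
  · rw [pvEnc_pos v h, pvZf, pvZf]
    simp only [List.length_append, List.length_singleton]
    rw [show n + 1 - (List.length (pvEnc (v / 62)) + 1) = n - List.length (pvEnc (v / 62)) by omega]
    simp [List.append_assoc]

lemma pvVal_snoc (t : List Char) (c : Char) : pvVal (t ++ [c]) = 62 * pvVal t + pvDval c := by
  simp [pvVal, List.foldl_append]

lemma pvRoundtrip (l : List Char) (hl : ∀ c ∈ l, c ∈ pvCharset.toList) :
    pvZf (pvEnc (pvVal l)) l.length = l := by
  induction l using List.reverseRecOn with
  | nil => simp [pvVal, pvEnc, pvEncodeLoop, pvZf]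
  | append_singleton t c ih =>
    have hc : c ∈ pvCharset.toList := hl c (by simp)
    have ht : ∀ c ∈ t, c ∈ pvCharset.toList := fun x hx => hl x (by simp [hx])
    obtain ⟨h0, h62, hch⟩ := pvCharFacts c hc
    have hd : pvDval c < 62 := by unfold pvDval; omega
    rw [pvVal_snoc, List.length_append, List.length_singleton, pvPeel]
    rw [show (62 * pvVal t + pvDval c) / 62 = pvVal t by omega,
        show (62 * pvVal t + pvDval c) % 62 = pvDval c by omega]
    rw [hch, ih ht]

lemma pvSumFold (l : List Char) (hl : ∀ c ∈ l, c ∈ pvCharset.toList) :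
    ∀ (k : Nat) (a : Int),
      (PySem.List.enumerate l.reverse (k : Int)).foldl
        (fun a ic => a + pvIdx ic.2 * 62 ^ ic.1.toNat) a
      = a + 62 ^ k * (pvVal l : Int) := by
  induction l using List.reverseRecOn with
  | nil => intro k a; simp [pvVal]
  | append_singleton t c ih =>
    intro k a
    have hc : c ∈ pvCharset.toList := hl c (by simp)
    have ht : ∀ c ∈ t, c ∈ pvCharset.toList := fun x hx => hl x (by simp [hx])
    obtain ⟨h0, _, _⟩ := pvCharFacts c hc
    rw [List.reverse_append]
    simp only [List.reverse_singleton, List.singleton_append, PySem.List.enumerate_cons,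
      List.foldl_cons]
    rw [show (k : Int) + 1 = ((k + 1 : Nat) : Int) by push_cast; ring]
    rw [ih ht (k + 1)]
    rw [pvVal_snoc]
    have : pvIdx c = (pvDval c : Int) := by rw [pvDval, Int.toNat_of_nonneg h0]
    rw [this]
    simp only [Int.toNat_natCast]
    push_cast
    ring

lemma pvScan_append (cs t : List Char) : ∀ i, i ≤ cs.length → pvScan (cs ++ t) i = pvScan cs i := by
  intro i
  induction i using Nat.strong_induction_on with
  | _ i ih =>
    intro hle
    conv_lhs => rw [pvScan]
    conv_rhs => rw [pvScan]
    by_cases h0 : 0 < i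
    · have hg : (cs ++ t).getD (i - 1) ' ' = cs.getD (i - 1) ' ' := by
        rw [List.getD_append]
        omega
      by_cases hz : cs.getD (i - 1) ' ' = 'z'
      · rw [dif_pos ⟨h0, hg.trans hz⟩, dif_pos ⟨h0, hz⟩]
        exact ih (i - 1) (by omega) (by omega)
      · rw [dif_neg (by rw [hg]; tauto), dif_neg (by tauto)]
    · rw [dif_neg (by tauto), dif_neg (by tauto)]

lemma pvScan_le (cs : List Char) (i : Nat) : pvScan cs i ≤ i := by
  induction i using Nat.strong_induction_on with
  | _ i ih =>
    rw [pvScan]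
    split
    · rename_i h
      exact le_trans (ih (i - 1) (by omega)) (by omega)
    · exact le_refl i

lemma pvAltL_snoc_nonz (l : List Char) (c : Char) (hc : c ≠ 'z') :
    pvAltL (l ++ [c]) = l ++ [PySem.List.pyGetD pvCharset.toList (pvIdx c + 1) ' '] := by
  have hg : (l ++ [c]).getD l.length ' ' = c := by simp
  simp only [pvAltL, List.length_append, List.length_singleton]
  rw [pvScan]
  rw [dif_neg (by
    rintro ⟨-, h2⟩
    rw [Nat.add_sub_cancel, hg] at h2
    exact hc h2)]
  rw [if_neg (by omega)]
  rw [Nat.add_sub_cancel, List.take_append_of_le_length (le_refl _), List.take_length, hg]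
  simp [pvIdx]

lemma pvAltL_snoc_z (l : List Char) : pvAltL (l ++ ['z']) = pvAltL l ++ ['0'] := by
  have hg : (l ++ ['z']).getD l.length ' ' = 'z' := by simp
  have hscan : pvScan (l ++ ['z']) (l.length + 1) = pvScan l l.length := by
    rw [pvScan]
    rw [dif_pos ⟨Nat.succ_pos _, by rw [Nat.add_sub_cancel]; exact hg⟩]
    rw [Nat.add_sub_cancel]
    exact pvScan_append l ['z'] l.length (le_refl _)
  have hj : pvScan l l.length ≤ l.length := pvScan_le l l.length
  simp only [pvAltL, List.length_append, List.length_singleton, hscan]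
  by_cases h0 : pvScan l l.length = 0
  · simp [h0, List.replicate_succ']
  · have h1 : pvScan l l.length - 1 < l.length := by omega
    have hg2 : (l ++ ['z']).getD (pvScan l l.length - 1) ' ' = l.getD (pvScan l l.length - 1) ' ' := by
      rw [List.getD_append]
      omega
    simp only [h0, if_false, hg2]
    rw [List.take_append_of_le_length (by omega)]
    rw [show l.length + 1 - pvScan l l.length = (l.length - pvScan l l.length) + 1 by omega]
    simp [List.replicate_succ']

lemma pvMain (l : List Char) (hl : ∀ c ∈ l, c ∈ pvCharset.toList) :
    pvZf (pvEnc (pvVal l + 1)) l.length = pvAltL l := by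
  induction l using List.reverseRecOn with
  | nil =>
    have he0 : pvEnc 0 = [] := by rw [pvEnc, pvEncodeLoop]; simp
    have h1 : pvEnc 1 = ['1'] := by
      rw [pvEnc_pos 1 (by norm_num)]
      norm_num [he0, show pvCharAt 1 = '1' from by decide]
    simp only [pvVal, List.foldl_nil, List.length_nil, h1]
    rw [pvAltL, pvScan]
    simp [pvZf]
  | append_singleton t c ih =>
    have hc : c ∈ pvCharset.toList := hl c (by simp)
    have ht : ∀ c ∈ t, c ∈ pvCharset.toList := fun x hx => hl x (by simp [hx])
    obtain ⟨h0, h62, hch⟩ := pvCharFacts c hc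
    rw [pvVal_snoc, List.length_append, List.length_singleton, pvPeel]
    by_cases hz : c = 'z'
    · subst hz
      have hdz : pvDval 'z' = 61 := by decide
      rw [hdz]
      rw [show (62 * pvVal t + 61 + 1) / 62 = pvVal t + 1 by omega,
          show (62 * pvVal t + 61 + 1) % 62 = 0 by omega]
      rw [ih ht, pvAltL_snoc_z, show pvCharAt 0 = '0' from by decide]
    · have hd61 : pvDval c < 61 := by
        have := pvCharFactsNonZ c hc hz
        unfold pvDval; omega
      rw [show (62 * pvVal t + pvDval c + 1) / 62 = pvVal t by omega,
          show (62 * pvVal t + pvDval c + 1) % 62 = pvDval c + 1 by omega]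
      rw [pvRoundtrip t ht, pvAltL_snoc_nonz t c hz]
      have : pvIdx c + 1 = ((pvDval c + 1 : Nat) : Int) := by
        unfold pvDval; omega
      rw [this, PySem.List.pyGetD_natCast]
      rfl

lemma pvAlt_eq (s : String) : increment_base62_alt s = String.ofList (pvAltL s.toList) := by
  unfold increment_base62_alt pvAltL
  simp only [apply_ite String.ofList]

-- ===== VERDICT (by name: the statement is the Claim_ definition above) =====
theorem increment_base62_spec : Claim_equal_increment_base62 := by
  intro s _ hpre0
  have hpre := pvPre_mem s hpre0
  unfold Spec_increment_base62 increment_base62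
  have hsum : (PySem.List.enumerate s.toList.reverse).foldl
      (fun a ic => a + pvIdx ic.2 * 62 ^ ic.1.toNat) 0 = (pvVal s.toList : Int) := by
    have := pvSumFold s.toList hpre 0 0
    simpa using this
  simp only [hsum]
  rw [show ((pvVal s.toList : Int) + 1).toNat = pvVal s.toList + 1 by omega]
  rw [← pvEnc]
  rw [pvZfill_eq _ _ (fun c hc => pvEnc_mem _ c (List.mem_of_mem_head? hc))]
  rw [pvMain s.toList hpre, pvAlt_eq]
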